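-- pv_equiv track=rewrite | github.com/treangenlab/bronko-test | bronko_test/src_py/utils.py | binary_to_nucleotide
-- ===== SOURCE A (Python) =====
-- def binary_to_nucleotide(binary: int, k: int) -> str:
--     """Convert a binary representation to a DNA k-mer string."""
--     bits_to_base = ['A', 'C', 'G', 'T']
--
--     kmer = []
--     for _ in range(k):
--         # Extract the last 2 bits
--         base = binary & 0b11
--         kmer.append(bits_to_base[base])
--         binary >>= 2
--
--     # Reverse since the bases are extracted in reverse order
--     return ''.join(reversed(kmer))
-- ===== SOURCE B (Python) =====
-- def binary_to_nucleotide(binary: int, k: int) -> str: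
--     """Convert a binary representation to a DNA k-mer string."""
--     bases = ['A', 'C', 'G', 'T']
--     return ''.join(bases[(binary >> (2 * (k - 1 - i))) & 0b11] for i in range(k))
-- ===== Notes on version B (the rewrite author's own statement) =====
-- stated objective: simpler
-- what changed: B computes each base MSB-first directly by shifting binary right by 2*(k-1-i) and masking, joining in one comprehension, instead of A's loop that mutates binary, collects bases LSB-first and reverses at the end.
import Mathlib
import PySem

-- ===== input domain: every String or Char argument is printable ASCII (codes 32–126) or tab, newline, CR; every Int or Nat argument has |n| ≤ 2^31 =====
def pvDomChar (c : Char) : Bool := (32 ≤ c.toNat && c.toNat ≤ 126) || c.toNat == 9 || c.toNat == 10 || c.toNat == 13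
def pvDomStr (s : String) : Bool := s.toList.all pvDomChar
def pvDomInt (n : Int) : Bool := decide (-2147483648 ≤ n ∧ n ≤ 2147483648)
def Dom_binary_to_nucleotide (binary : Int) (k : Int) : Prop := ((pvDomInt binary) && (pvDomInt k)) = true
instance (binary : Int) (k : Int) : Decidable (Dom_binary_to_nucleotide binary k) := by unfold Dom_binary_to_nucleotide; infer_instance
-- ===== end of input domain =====

-- B reads each base MSB-first with a per-position shift-and-mask in one comprehension,
-- replacing A's loop that mutates binary, collects LSB-first and reverses; objective: simpler.

-- ===== PORT A =====
-- 'bits_to_base[base]' can never raise (base = binary & 3 ∈ [0,3]), so pyGetD's default "" is unreachable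
def binary_to_nucleotide (binary : Int) (k : Int) : String :=
  let bits_to_base : List String := ["A", "C", "G", "T"]
  let st := (PySem.List.pyRange 0 k 1).foldl
    (fun (st : Int × List String) _ =>
      let base := PySem.Int.band st.1 3
      (st.1 >>> (2 : Nat), st.2 ++ [PySem.List.pyGetD bits_to_base base ""]))
    (binary, ([] : List String))
  PySem.Str.join "" st.2.reverse

-- ===== PORT B =====
-- 'bases[… & 0b11]' can never raise (the index is in [0,3]), so pyGetD's default "" is unreachable;
-- the shift amount 2*(k-1-i) is ≥ 0 for every i in range(k), so '.toNat' is exact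
def binary_to_nucleotide_alt (binary : Int) (k : Int) : String :=
  let bases : List String := ["A", "C", "G", "T"]
  PySem.Str.join "" ((PySem.List.pyRange 0 k 1).map
    (fun i => PySem.List.pyGetD bases (PySem.Int.band (binary >>> (2 * (k - 1 - i)).toNat) 3) ""))

-- ===== PRECONDITION & SPEC =====
def Spec_binary_to_nucleotide (binary : Int) (k : Int) (out : String) : Prop := out = binary_to_nucleotide_alt binary k
instance (binary : Int) (k : Int) (out : String) : Decidable (Spec_binary_to_nucleotide binary k out) := by unfold Spec_binary_to_nucleotide; infer_instance

-- ===== CLAIM =====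
def Claim_equal_binary_to_nucleotide : Prop := ∀ (binary : Int) (k : Int), Dom_binary_to_nucleotide binary k → Spec_binary_to_nucleotide binary k (binary_to_nucleotide binary k)

-- ===== LEMMAS AND PROOFS =====

-- the k base characters, MSB-first, as both programs produce them
def nucDigits : Nat → Int → List String
  | 0, _ => []
  | (K + 1), b => nucDigits K (b / 4) ++ [PySem.List.pyGetD ["A", "C", "G", "T"] (b % 4) ""]

-- A's kmer list as it grows (LSB-first)
def kmerF : Int → Nat → List String
  | _, 0 => []
  | b, (n + 1) => PySem.List.pyGetD ["A", "C", "G", "T"] (PySem.Int.band b 3) "" :: kmerF (b >>> (2 : Nat)) n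

theorem band_three (b : Int) : PySem.Int.band b 3 = b % 4 := by
  rw [PySem.Int.band.eq_1]
  have h3 : Int.toNat 3 = 3 := rfl
  by_cases hb : 0 ≤ b
  · simp only [hb, if_true, (by norm_num : (0:Int) ≤ 3), h3]
    have h := Nat.and_two_pow_sub_one_eq_mod b.toNat 2
    norm_num at h
    rw [h]
    omega
  · simp only [hb, if_false, (by norm_num : (0:Int) ≤ 3), if_true, h3]
    generalize hgen : (-b - 1).toNat = n
    have h : n &&& 3 = n % 4 := by
      have := Nat.and_two_pow_sub_one_eq_mod n 2; norm_num at this; exact this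
    rw [Nat.and_comm, h]
    omega

theorem shift_pow (b : Int) (n : Nat) : b >>> (2 * n) = b / 4 ^ n := by
  have := Int.shiftRight_eq_div_pow b (2 * n)
  rw [this, pow_mul]
  norm_num

theorem foldlA (l : List Int) (b : Int) (acc : List String) :
    (l.foldl (fun (st : Int × List String) _ =>
      (st.1 >>> (2 : Nat), st.2 ++ [PySem.List.pyGetD ["A", "C", "G", "T"] (PySem.Int.band st.1 3) ""]))
      (b, acc)).2 = acc ++ kmerF b l.length := by
  induction l generalizing b acc with
  | nil => simp [kmerF]
  | cons x xs ih =>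
    simp only [List.foldl_cons, List.length_cons, kmerF]
    rw [ih]
    simp

theorem kmerF_reverse (n : Nat) (b : Int) : (kmerF b n).reverse = nucDigits n b := by
  induction n generalizing b with
  | zero => simp [kmerF, nucDigits]
  | succ m ih =>
    have h2 : b >>> (2 : Nat) = b / 4 := by
      have := shift_pow b 1; norm_num at this; exact this
    simp only [kmerF, List.reverse_cons, ih, nucDigits, h2, band_three]

-- B's comprehension, MSB-first, coincides with nucDigits
theorem mapB (K : Nat) (b : Int) :
    (PySem.List.pyRange 0 (K : Int) 1).map
      (fun i => PySem.List.pyGetD ["A", "C", "G", "T"]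
        (PySem.Int.band (b >>> (2 * ((K : Int) - 1 - i)).toNat) 3) "")
      = nucDigits K b := by
  induction K generalizing b with
  | zero => simp [nucDigits, PySem.List.pyRange]
  | succ K ih =>
    rw [show ((K + 1 : Nat) : Int) = (K : Int) + 1 from by push_cast; ring,
        PySem.List.pyRange_one_succ_right (by omega : (0:Int) ≤ (K : Int))]
    rw [List.map_append]
    have hpref :
        (PySem.List.pyRange 0 (K : Int) 1).map
          (fun i => PySem.List.pyGetD ["A", "C", "G", "T"]
            (PySem.Int.band (b >>> (2 * ((K : Int) + 1 - 1 - i)).toNat) 3) "")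
        = (PySem.List.pyRange 0 (K : Int) 1).map
          (fun i => PySem.List.pyGetD ["A", "C", "G", "T"]
            (PySem.Int.band ((b / 4) >>> (2 * ((K : Int) - 1 - i)).toNat) 3) "") := by
      apply List.map_congr_left
      intro i hi
      have hb := PySem.List.mem_pyRange_one.mp hi
      have h1 : (2 * ((K : Int) + 1 - 1 - i)).toNat = 2 * ((K : Int) - 1 - i).toNat + 2 := by omega
      have h2 : (2 * ((K : Int) - 1 - i)).toNat = 2 * ((K : Int) - 1 - i).toNat := by omega
      rw [h1, h2]
      congr 2
      rw [show 2 * ((K : Int) - 1 - i).toNat + 2 = 2 * (((K : Int) - 1 - i).toNat + 1) from by ring,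
          shift_pow, shift_pow]
      rw [Int.ediv_ediv_of_nonneg (by norm_num : (0:Int) ≤ 4)]
      congr 1
      ring
    rw [hpref, ih]
    have hlast : (2 * ((K : Int) + 1 - 1 - (K : Int))).toNat = 0 := by omega
    simp only [List.map_cons, List.map_nil, hlast]
    have h0 : b >>> (0 : Nat) = b := by simp
    rw [h0, band_three]
    rfl

-- ===== VERDICT =====
theorem binary_to_nucleotide_spec : Claim_equal_binary_to_nucleotide := by
  intro binary k _
  show binary_to_nucleotide binary k = binary_to_nucleotide_alt binary k
  simp only [binary_to_nucleotide, binary_to_nucleotide_alt]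
  by_cases hk : k ≤ 0
  · rw [PySem.List.pyRange_one_eq_nil hk]
    rfl
  · have hkK : k = ((k.toNat : Nat) : Int) := by omega
    congr 1
    have hlenr : (PySem.List.pyRange 0 k 1).length = k.toNat := by
      rw [PySem.List.length_pyRange_one]; omega
    rw [foldlA, hlenr, List.nil_append, kmerF_reverse]
    rw [hkK, mapB]
    congr 1
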